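-- pv_equiv track=rewrite | github.com/kriver/aoc-2021 | Python/day24.py | run_python
-- ===== SOURCE A (Python) =====
-- from typing import List
--
-- def run_python(inp: List[int]):
--     x_add = [13, 12, 11, 0, 15, -13, 10, -9, 11, 13, -14, -3, -2, -14]
--     z_div = [1, 1, 1, 26, 1, 26, 1, 26, 1, 1, 26, 26, 26, 26]
--     y_add = [14, 8, 5, 4, 10, 13, 16, 5, 6, 13, 6, 7, 13, 3]
--     z = 0
--     for i, digit in enumerate(inp):
--         if z % 26 == digit - x_add[i]:  # can only be true for i in [3,5,7,10,11,12,13]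
--             z //= 26
--         else:
--             z //= z_div[i]
--             z = z * 26 + digit + y_add[i]
--     return z
-- ===== SOURCE B (Python) =====
-- from typing import List
--
-- def run_python(inp: List[int]):
--     x_add = [13, 12, 11, 0, 15, -13, 10, -9, 11, 13, -14, -3, -2, -14]
--     z_div = [1, 1, 1, 26, 1, 26, 1, 26, 1, 1, 26, 26, 26, 26]
--     y_add = [14, 8, 5, 4, 10, 13, 16, 5, 6, 13, 6, 7, 13, 3]
--     # z kept as a stack of base-26 "digits" (not normalised; carries are
--     # propagated on pop so the represented integer always matches).
--     stack = []
--
--     def pop26():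
--         v = stack.pop() if stack else 0
--         c = v // 26
--         if stack:
--             stack[-1] += c
--         elif c:
--             stack.append(c)
--
--     for i, digit in enumerate(inp):
--         top = stack[-1] % 26 if stack else 0
--         if top == digit - x_add[i]:
--             pop26()
--         else:
--             if z_div[i] == 26:
--                 pop26()
--             stack.append(digit + y_add[i])
--     z = 0
--     for d in stack:
--         z = z * 26 + d
--     return z
-- ===== Notes on version B (the rewrite author's own statement) =====
-- stated objective: alternative
-- what changed: B replaces the single big integer z by an explicit stack of base-26 digits (peek/pop/push with carry propagation) and reconstructs the integer once at the end, instead of A's repeated %/ //= / *26 arithmetic on one accumulator.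
import Mathlib
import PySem

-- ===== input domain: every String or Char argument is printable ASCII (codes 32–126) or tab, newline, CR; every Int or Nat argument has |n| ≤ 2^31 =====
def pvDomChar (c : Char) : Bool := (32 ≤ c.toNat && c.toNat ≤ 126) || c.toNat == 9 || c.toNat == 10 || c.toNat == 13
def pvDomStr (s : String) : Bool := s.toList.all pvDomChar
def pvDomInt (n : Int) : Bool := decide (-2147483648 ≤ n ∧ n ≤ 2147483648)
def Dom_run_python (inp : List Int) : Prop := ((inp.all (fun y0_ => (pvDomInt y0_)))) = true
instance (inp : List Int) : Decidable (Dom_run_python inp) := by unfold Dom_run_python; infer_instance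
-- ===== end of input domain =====

-- B represents z as an explicit stack of base-26 digits (with carry fixing on pop)
-- instead of A's single-integer %/ //= / *26 arithmetic: an alternative data representation.
-- Pre_ excludes inputs longer than 14, on which both Pythons raise IndexError.


-- ===== PORT A =====
def xAddA : List Int := [13, 12, 11, 0, 15, -13, 10, -9, 11, 13, -14, -3, -2, -14]
def zDivA : List Int := [1, 1, 1, 26, 1, 26, 1, 26, 1, 1, 26, 26, 26, 26]
def yAddA : List Int := [14, 8, 5, 4, 10, 13, 16, 5, 6, 13, 6, 7, 13, 3]

def run_python (inp : List Int) : Int :=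
  (PySem.List.enumerate inp 0).foldl (fun z p =>
    if PySem.Int.mod z 26 = p.2 - PySem.List.pyGetD xAddA p.1 0 then
      PySem.Int.floordiv z 26
    else
      let z' := PySem.Int.floordiv z (PySem.List.pyGetD zDivA p.1 0)
      z' * 26 + p.2 + PySem.List.pyGetD yAddA p.1 0) 0

-- ===== PORT B =====
def xAddB : List Int := [13, 12, 11, 0, 15, -13, 10, -9, 11, 13, -14, -3, -2, -14]
def zDivB : List Int := [1, 1, 1, 26, 1, 26, 1, 26, 1, 1, 26, 26, 26, 26]
def yAddB : List Int := [14, 8, 5, 4, 10, 13, 16, 5, 6, 13, 6, 7, 13, 3]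

-- pop26: pop the top digit (0 if empty) and add its carry v // 26 to the new top
def pop26 (s : List Int) : List Int :=
  let v := s.getLast?.getD 0
  let s' := s.dropLast
  let c := PySem.Int.floordiv v 26
  match s'.getLast? with
  | some t => s'.dropLast ++ [t + c]
  | none   => if c ≠ 0 then [c] else []

def run_python_alt (inp : List Int) : Int :=
  let stack := (PySem.List.enumerate inp 0).foldl (fun s p =>
    let top := match s.getLast? with | some v => PySem.Int.mod v 26 | none => 0
    if top = p.2 - PySem.List.pyGetD xAddB p.1 0 then
      pop26 s
    else
      (if PySem.List.pyGetD zDivB p.1 0 = 26 then pop26 s else s)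
        ++ [p.2 + PySem.List.pyGetD yAddB p.1 0]) []
  stack.foldl (fun a d => a * 26 + d) 0

-- ===== PRECONDITION & SPEC =====
-- Both Pythons index 14-element tables at each input position: on inputs longer
-- than 14 both raise IndexError, so Pre_ excludes exactly those.
def Pre_run_python (inp : List Int) : Prop := inp.length ≤ 14
instance (inp : List Int) : Decidable (Pre_run_python inp) := by unfold Pre_run_python; infer_instance
def pvWitness_run_python : List Int := [9, 5, 1]
def Spec_run_python (inp : List Int) (out : Int) : Prop := out = run_python_alt inp
instance (inp : List Int) (out : Int) : Decidable (Spec_run_python inp out) := by unfold Spec_run_python; infer_instance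

-- ===== CLAIM (what is proved, stated in full; the proofs are below) =====
def Claim_equal_run_python : Prop := ∀ (inp : List Int), Dom_run_python inp → Pre_run_python inp → Spec_run_python inp (run_python inp)

-- ===== LEMMAS AND PROOFS =====

-- the integer a stack of base-26 digits represents
def stackVal (s : List Int) : Int := s.foldl (fun a d => a * 26 + d) 0

theorem stackVal_append_singleton (s : List Int) (v : Int) :
    stackVal (s ++ [v]) = stackVal s * 26 + v := by
  simp [stackVal, List.foldl_append]

theorem peek_eq (s : List Int) :
    PySem.Int.mod (stackVal s) 26 =
      (match s.getLast? with | some v => PySem.Int.mod v 26 | none => 0) := by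
  rcases List.eq_nil_or_concat s with rfl | ⟨t, v, rfl⟩
  · simp [stackVal]
  · rw [List.concat_eq_append, stackVal_append_singleton]
    simp only [List.getLast?_concat]
    rw [PySem.Int.mod_eq_emod_of_pos (by norm_num),
        PySem.Int.mod_eq_emod_of_pos (by norm_num)]
    omega

theorem pop_eq (s : List Int) :
    PySem.Int.floordiv (stackVal s) 26 = stackVal (pop26 s) := by
  rcases List.eq_nil_or_concat s with rfl | ⟨t, v, rfl⟩
  · simp [stackVal, pop26]
  · rw [List.concat_eq_append, stackVal_append_singleton,
        PySem.Int.floordiv_eq_ediv_of_pos (by norm_num)]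
    have hv : (stackVal t * 26 + v) / 26 = stackVal t + v / 26 := by omega
    have hfd : PySem.Int.floordiv v 26 = v / 26 :=
      PySem.Int.floordiv_eq_ediv_of_pos (by norm_num)
    rw [hv]
    unfold pop26
    simp only [List.getLast?_concat, List.dropLast_concat, Option.getD_some, hfd]
    rcases List.eq_nil_or_concat t with rfl | ⟨u, w, rfl⟩
    · split_ifs with h <;> simp [stackVal]
      omega
    · have h1 : (u ++ [w]).getLast? = some w := by simp
      have h2 : (u ++ [w]).dropLast = u := by simp
      simp only [List.concat_eq_append, h1, h2] at *
      rw [stackVal_append_singleton, stackVal_append_singleton]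
      ring

theorem zdiv_cases (k : Nat) (h : k < 14) :
    PySem.List.pyGetD zDivA (k : Int) 0 = 1 ∨ PySem.List.pyGetD zDivA (k : Int) 0 = 26 := by
  interval_cases k <;> decide

theorem tables_eq (i : Int) :
    PySem.List.pyGetD xAddA i 0 = PySem.List.pyGetD xAddB i 0 ∧
    PySem.List.pyGetD zDivA i 0 = PySem.List.pyGetD zDivB i 0 ∧
    PySem.List.pyGetD yAddA i 0 = PySem.List.pyGetD yAddB i 0 := by
  refine ⟨?_, ?_, ?_⟩ <;> rfl

theorem loop_eq (inp : List Int) : ∀ (k : Nat) (s : List Int),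
    k + inp.length ≤ 14 →
    (PySem.List.enumerate inp (k : Int)).foldl (fun z p =>
      if PySem.Int.mod z 26 = p.2 - PySem.List.pyGetD xAddA p.1 0 then
        PySem.Int.floordiv z 26
      else
        let z' := PySem.Int.floordiv z (PySem.List.pyGetD zDivA p.1 0)
        z' * 26 + p.2 + PySem.List.pyGetD yAddA p.1 0) (stackVal s)
    = stackVal ((PySem.List.enumerate inp (k : Int)).foldl (fun s p =>
        let top := match s.getLast? with | some v => PySem.Int.mod v 26 | none => 0
        if top = p.2 - PySem.List.pyGetD xAddB p.1 0 then
          pop26 s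
        else
          (if PySem.List.pyGetD zDivB p.1 0 = 26 then pop26 s else s)
            ++ [p.2 + PySem.List.pyGetD yAddB p.1 0]) s) := by
  induction inp with
  | nil => intro k s _; simp [PySem.List.enumerate]
  | cons d rest ih =>
    intro k s hk
    rw [PySem.List.enumerate_cons]
    simp only [List.foldl_cons]
    have hkk : (k : Int) + 1 = ((k + 1 : Nat) : Int) := by push_cast; ring
    rw [hkk]
    have hx := (tables_eq (k : Int)).1
    have hz := (tables_eq (k : Int)).2.1
    have hy := (tables_eq (k : Int)).2.2
    have hpk := peek_eq s
    by_cases hc : PySem.Int.mod (stackVal s) 26 = d - PySem.List.pyGetD xAddA (k : Int) 0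
    · rw [if_pos hc, if_pos (by rw [← hpk, ← hx]; exact hc)]
      rw [pop_eq]
      exact ih (k + 1) (pop26 s) (by simp at hk ⊢; omega)
    · rw [if_neg hc, if_neg (by rw [← hpk, ← hx]; exact hc)]
      have hstep :
          (let z' := PySem.Int.floordiv (stackVal s) (PySem.List.pyGetD zDivA (k : Int) 0)
           z' * 26 + d + PySem.List.pyGetD yAddA (k : Int) 0)
          = stackVal ((if PySem.List.pyGetD zDivB (k : Int) 0 = 26 then pop26 s else s)
              ++ [d + PySem.List.pyGetD yAddB (k : Int) 0]) := by
        rw [stackVal_append_singleton, ← hy, ← hz]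
        rcases zdiv_cases k (by simp at hk; omega) with h1 | h26
        · rw [h1, if_neg (by norm_num)]
          rw [PySem.Int.floordiv_eq_ediv_of_pos (by norm_num), Int.ediv_one]
          ring
        · rw [h26, if_pos rfl, ← pop_eq]
          ring
      rw [hstep]
      exact ih (k + 1) _ (by simp at hk ⊢; omega)

-- ===== VERDICT (by name: the statement is the Claim_ definition above) =====
theorem run_python_spec : Claim_equal_run_python := by
  intro inp _ hpre
  unfold Spec_run_python run_python run_python_alt
  have h := loop_eq inp 0 [] (by simpa [Pre_run_python] using hpre)
  simpa [stackVal] using h
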